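-- pv_equiv track=rewrite | github.com/cma2015/iwa-miRNA | moduleii/scripts/featureScripts/0extract_features.py | get_matched_pos
-- ===== SOURCE A (Python) =====
-- def get_matched_pos(start_pos, end_pos, matched_str):
--     rna_length = len(matched_str)
--     if start_pos < 0:
--         start_pos = 0
--     if end_pos < 0:
--         end_pos = end_pos
--     if start_pos > rna_length:
--         start_pos = rna_length - 1
--     if end_pos > rna_length:
--         end_pos = rna_length - 1
--     if start_pos == 0 and end_pos == 0:
--         return([0,0])
--     matched_pos_list = []
--     for i in range(start_pos, end_pos):
--         curPos = matched_str[i]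
--         matched_pos_list.append(curPos)
--     if matched_pos_list[0] == -1:
--         idx = 0
--         for i in range(len(matched_pos_list)):
--             if matched_pos_list[i] != -1:
--                 idx = i
--                 break
--         matched_pos = matched_pos_list[idx]
--         idxList = range(idx)
--         for i in idxList[::-1]:
--             matched_pos = matched_pos + 1
--             matched_pos_list[i] = matched_pos
--     if matched_pos_list[-1] == -1:
--         idxList = range(len(matched_pos_list))
--         idx = 0
--         for i in idxList[::-1]:
--             if matched_pos_list[i] != -1:
--                 idx = i
--                 break
--         matched_pos =  matched_pos_list[idx]
--         idx = idx + 1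
--         for i in range(idx, len(matched_pos_list)):
--             matched_pos = matched_pos - 1
--             matched_pos_list[i] = matched_pos
--     if matched_pos_list[0] < 0:
--         matched_pos_list[0] = 0
--     if matched_pos_list[0] > rna_length:
--         matched_pos_list[0] = rna_length - 1
--     if matched_pos_list[-1] < 0:
--         matched_pos_list[-1] = 0
--     if matched_pos_list[-1] > rna_length:
--         matched_pos_list[-1] = rna_length - 1
--     return([matched_pos_list[0], matched_pos_list[-1]])
-- ===== SOURCE B (Python) =====
-- def get_matched_pos(start_pos, end_pos, matched_str):
--     rna_length = len(matched_str)
--     if start_pos < 0: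
--         start_pos = 0
--     if start_pos > rna_length:
--         start_pos = rna_length - 1
--     if end_pos > rna_length:
--         end_pos = rna_length - 1
--     if start_pos == 0 and end_pos == 0:
--         return [0, 0]
--     window = matched_str[start_pos:end_pos]
--     first = window[0]
--     if first == -1:
--         for j, v in enumerate(window):
--             if v != -1:
--                 first = v + j
--                 break
--     last = window[-1]
--     if last == -1:
--         for k, v in enumerate(reversed(window)):
--             if v != -1:
--                 last = v - k
--                 break
--     def clamp(v):
--         if v < 0:
--             return 0
--         if v > rna_length:
--             return rna_length - 1
--         return v
--     return [clamp(first), clamp(last)]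
-- ===== Notes on version B (the rewrite author's own statement) =====
-- stated objective: simpler
-- what changed: B drops A's materialised slice list, its two index-finding loops and its two in-place fill loops, and instead computes each endpoint directly from the window: a forward enumerate scan for the first position and a backward one for the last, each by offset arithmetic, followed by the same clamps.
import Mathlib
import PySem

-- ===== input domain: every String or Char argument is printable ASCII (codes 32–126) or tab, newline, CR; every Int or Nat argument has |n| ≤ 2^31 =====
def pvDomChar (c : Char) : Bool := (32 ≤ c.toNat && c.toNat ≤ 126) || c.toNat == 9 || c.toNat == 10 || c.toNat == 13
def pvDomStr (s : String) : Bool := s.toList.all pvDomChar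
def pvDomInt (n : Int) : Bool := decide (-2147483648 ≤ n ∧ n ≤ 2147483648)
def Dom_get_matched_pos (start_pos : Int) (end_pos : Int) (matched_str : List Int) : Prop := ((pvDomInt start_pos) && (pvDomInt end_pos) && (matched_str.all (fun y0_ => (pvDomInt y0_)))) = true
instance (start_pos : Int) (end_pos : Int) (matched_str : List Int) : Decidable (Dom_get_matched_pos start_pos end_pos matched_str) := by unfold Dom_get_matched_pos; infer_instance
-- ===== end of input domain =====

-- B replaces A's materialised slice plus two in-place fill loops with two direct
-- break-scans (forward / backward) computing each endpoint by offset arithmetic; same results, simpler.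

-- ===== PORT A =====
-- scan 'idx = 0; for i in R: if l[i] != -1: idx = i; break'
def aScan (l : List Int) : List Nat → Nat
  | [] => 0
  | i :: rest => if l.getD i 0 ≠ -1 then i else aScan l rest

-- 'for i in idxList[::-1]: matched_pos += 1; l[i] = matched_pos'
def aFillF (l : List Int) (mp : Int) : List Nat → List Int
  | [] => l
  | i :: rest => aFillF (l.set i (mp + 1)) (mp + 1) rest

-- 'for i in range(idx, len(l)): matched_pos -= 1; l[i] = matched_pos'
def aFillB (l : List Int) (mp : Int) : List Nat → List Int
  | [] => l
  | i :: rest => aFillB (l.set i (mp - 1)) (mp - 1) rest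

-- 'if matched_pos_list[0] == -1: idx = …scan…; matched_pos = matched_pos_list[idx]; for i in range(idx)[::-1]: …'
def aFront (l : List Int) : List Int :=
  if PySem.List.pyGetD l 0 0 = -1 then
    let idx := aScan l (List.range l.length)
    aFillF l (l.getD idx 0) (List.range idx).reverse
  else l

-- 'if matched_pos_list[-1] == -1: idx = …reverse scan…; matched_pos = matched_pos_list[idx]; for i in range(idx+1, len): …'
def aBack (l : List Int) : List Int :=
  if PySem.List.pyGetD l (-1) 0 = -1 then
    let idx := aScan l (List.range l.length).reverse
    aFillB l (l.getD idx 0) (List.range' (idx + 1) (l.length - (idx + 1)))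
  else l

-- the four final clamp statements, one helper each
def aClamp1 (l : List Int) : List Int := if PySem.List.pyGetD l 0 0 < 0 then l.set 0 0 else l
def aClamp2 (rna_length : Int) (l : List Int) : List Int :=
  if PySem.List.pyGetD l 0 0 > rna_length then l.set 0 (rna_length - 1) else l
def aClamp3 (l : List Int) : List Int :=
  if PySem.List.pyGetD l (-1) 0 < 0 then l.set (l.length - 1) 0 else l
def aClamp4 (rna_length : Int) (l : List Int) : List Int :=
  if PySem.List.pyGetD l (-1) 0 > rna_length then l.set (l.length - 1) (rna_length - 1) else l

def get_matched_pos (start_pos : Int) (end_pos : Int) (matched_str : List Int) : List Int :=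
  let rna_length : Int := matched_str.length
  let sp0 := if start_pos < 0 then 0 else start_pos
  let ep0 := end_pos
  let sp := if sp0 > rna_length then rna_length - 1 else sp0
  let ep := if ep0 > rna_length then rna_length - 1 else ep0
  if sp = 0 ∧ ep = 0 then [0, 0]
  else
    let l0 := (PySem.List.pyRange sp ep 1).foldl
        (fun acc i => acc ++ [PySem.List.pyGetD matched_str i 0]) []
    let l6 := aClamp4 rna_length (aClamp3 (aClamp2 rna_length (aClamp1 (aBack (aFront l0)))))
    [PySem.List.pyGetD l6 0 0, PySem.List.pyGetD l6 (-1) 0]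

-- ===== PORT B =====
def bClamp (rna_length v : Int) : Int := if v < 0 then 0 else if v > rna_length then rna_length - 1 else v

-- 'for j, v in enumerate(window): if v != -1: first = v + j; break' (first stays -1 if no hit)
def bLoopF : List (Int × Int) → Int
  | [] => -1
  | (j, v) :: rest => if v ≠ -1 then v + j else bLoopF rest

-- 'for k, v in enumerate(reversed(window)): if v != -1: last = v - k; break' (last stays -1 if no hit)
def bLoopB : List (Int × Int) → Int
  | [] => -1
  | (k, v) :: rest => if v ≠ -1 then v - k else bLoopB rest

def get_matched_pos_alt (start_pos : Int) (end_pos : Int) (matched_str : List Int) : List Int :=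
  let rna_length : Int := matched_str.length
  let sp0 := if start_pos < 0 then 0 else start_pos
  let sp := if sp0 > rna_length then rna_length - 1 else sp0
  let ep := if end_pos > rna_length then rna_length - 1 else end_pos
  if sp = 0 ∧ ep = 0 then [0, 0]
  else
    let window := PySem.List.slice matched_str (some sp) (some ep)
    -- 'window[0]' / 'window[-1]' raise IndexError on an empty window (= outside Pre_); default 0 stands in for the raise
    let first0 := PySem.List.pyGetD window 0 0
    let first := if first0 = -1 then bLoopF (PySem.List.enumerate window 0) else first0
    let last0 := PySem.List.pyGetD window (-1) 0
    let last := if last0 = -1 then bLoopB (PySem.List.enumerate window.reverse 0) else last0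
    [bClamp rna_length first, bClamp rna_length last]

-- ===== PRECONDITION & SPEC =====
-- Pre_ excludes exactly the inputs on which A raises IndexError: after A's header clamps either the
-- iteration range [sp, ep) is empty (and the 0/0 shortcut does not fire), so A indexes an empty list,
-- or sp is negative (empty input with start_pos > 0), so A indexes matched_str out of range.
def Pre_get_matched_pos (start_pos : Int) (end_pos : Int) (matched_str : List Int) : Prop :=
  let rna_length : Int := matched_str.length
  let sp0 := if start_pos < 0 then 0 else start_pos
  let sp := if sp0 > rna_length then rna_length - 1 else sp0
  let ep := if end_pos > rna_length then rna_length - 1 else end_pos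
  (sp = 0 ∧ ep = 0) ∨ (0 ≤ sp ∧ sp < ep)
instance (start_pos : Int) (end_pos : Int) (matched_str : List Int) : Decidable (Pre_get_matched_pos start_pos end_pos matched_str) := by unfold Pre_get_matched_pos; infer_instance

def pvWitness_get_matched_pos : Int × Int × List Int := (1, 3, [5, -1, 7, -1])

def Spec_get_matched_pos (start_pos : Int) (end_pos : Int) (matched_str : List Int) (out : List Int) : Prop := out = get_matched_pos_alt start_pos end_pos matched_str
instance (start_pos : Int) (end_pos : Int) (matched_str : List Int) (out : List Int) : Decidable (Spec_get_matched_pos start_pos end_pos matched_str out) := by unfold Spec_get_matched_pos; infer_instance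

-- ===== CLAIM (what is proved, stated in full; the proofs are below) =====
def Claim_equal_get_matched_pos : Prop := ∀ (start_pos : Int) (end_pos : Int) (matched_str : List Int), Dom_get_matched_pos start_pos end_pos matched_str → Pre_get_matched_pos start_pos end_pos matched_str → Spec_get_matched_pos start_pos end_pos matched_str (get_matched_pos start_pos end_pos matched_str)

-- ===== LEMMAS AND PROOFS =====

-- bridging pyGetD at 0 / -1 to Nat-indexed getD
theorem pyGetD_zero_eq (l : List Int) : PySem.List.pyGetD l 0 0 = l.getD 0 0 := by
  rcases l with _ | ⟨x, t⟩ <;>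
    simp [PySem.List.pyGetD, PySem.List.pyGet?, PySem.List.pyIdx?, List.getD_eq_getElem?_getD]

theorem pyGetD_neg_one_eq (l : List Int) (h : l ≠ []) :
    PySem.List.pyGetD l (-1) 0 = l.getD (l.length - 1) 0 := by
  rcases l with _ | ⟨x, t⟩
  · simp at h
  · simp [PySem.List.pyGetD, PySem.List.pyGet?, PySem.List.pyIdx?, List.getD_eq_getElem?_getD]

theorem getD_set_ne (l : List Int) (i j : Nat) (x : Int) (h : i ≠ j) :
    (l.set i x).getD j 0 = l.getD j 0 := by
  simp [List.getD_eq_getElem?_getD, List.getElem?_set_ne h]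

theorem getD_set_self (l : List Int) (i : Nat) (x : Int) (h : i < l.length) :
    (l.set i x).getD i 0 = x := by
  simp [List.getD_eq_getElem?_getD, h]

-- proof-side views of B's two break-scans, over the list of scanned VALUES with a running offset
def auxF : List Int → Int → Int
  | [], _ => -1
  | v :: t, d => if v ≠ -1 then v + d else auxF t (d + 1)

def auxB : List Int → Int → Int
  | [], _ => -1
  | v :: t, d => if v ≠ -1 then v - d else auxB t (d + 1)

theorem auxF_all (r : List Int) (d : Int) (h : ∀ v ∈ r, v = -1) : auxF r d = -1 := by
  induction r generalizing d with
  | nil => rfl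
  | cons v t ih =>
    have hv := h v (by simp)
    simp [auxF, hv, ih (d + 1) (fun w hw => h w (by simp [hw]))]

theorem auxB_all (r : List Int) (d : Int) (h : ∀ v ∈ r, v = -1) : auxB r d = -1 := by
  induction r generalizing d with
  | nil => rfl
  | cons v t ih =>
    have hv := h v (by simp)
    simp [auxB, hv, ih (d + 1) (fun w hw => h w (by simp [hw]))]

theorem auxF_first (r : List Int) (j : Nat) (d : Int) (hj : j < r.length)
    (hb : ∀ i, i < j → r.getD i 0 = -1) (hh : r.getD j 0 ≠ -1) :
    auxF r d = r.getD j 0 + (d + j) := by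
  induction r generalizing j d with
  | nil => simp at hj
  | cons v t ih =>
    cases j with
    | zero => simp_all [auxF]
    | succ j' =>
      have hv : v = -1 := by simpa using hb 0 (Nat.succ_pos j')
      have : auxF (v :: t) d = auxF t (d + 1) := by simp [auxF, hv]
      rw [this]
      have := ih j' (d + 1) (by simpa using hj)
        (fun i hi => by simpa using hb (i + 1) (by omega))
        (by simpa using hh)
      rw [this]
      simp
      ring

theorem auxB_first (r : List Int) (j : Nat) (d : Int) (hj : j < r.length)
    (hb : ∀ i, i < j → r.getD i 0 = -1) (hh : r.getD j 0 ≠ -1) :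
    auxB r d = r.getD j 0 - (d + j) := by
  induction r generalizing j d with
  | nil => simp at hj
  | cons v t ih =>
    cases j with
    | zero => simp_all [auxB]
    | succ j' =>
      have hv : v = -1 := by simpa using hb 0 (Nat.succ_pos j')
      have : auxB (v :: t) d = auxB t (d + 1) := by simp [auxB, hv]
      rw [this]
      have := ih j' (d + 1) (by simpa using hj)
        (fun i hi => by simpa using hb (i + 1) (by omega))
        (by simpa using hh)
      rw [this]
      simp
      ring

-- B's loops over enumerate are the aux scans
theorem bLoopF_enumerate (w : List Int) : ∀ s : Int, bLoopF (PySem.List.enumerate w s) = auxF w s := by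
  induction w with
  | nil => intro s; rfl
  | cons v t ih =>
    intro s
    rw [PySem.List.enumerate_cons]
    by_cases hv : v = -1 <;> simp [bLoopF, auxF, hv, ih]

theorem bLoopB_enumerate (w : List Int) : ∀ s : Int, bLoopB (PySem.List.enumerate w s) = auxB w s := by
  induction w with
  | nil => intro s; rfl
  | cons v t ih =>
    intro s
    rw [PySem.List.enumerate_cons]
    by_cases hv : v = -1 <;> simp [bLoopB, auxB, hv, ih]

-- the Python slice ms[a:b] (0 ≤ a ≤ b ≤ len) is the list of values read at range(a, b)
theorem slice_eq_map_pyRange (ms : List Int) (a b : Int) (h0 : 0 ≤ a) (hab : a ≤ b)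
    (hb : b ≤ (ms.length : Int)) :
    PySem.List.slice ms (some a) (some b) =
      (PySem.List.pyRange a b 1).map (fun i => PySem.List.pyGetD ms i 0) := by
  rw [PySem.List.slice_toNat ms h0 (by omega)]
  apply List.ext_getElem
  · simp [PySem.List.length_pyRange_one]
    omega
  · intro k h1 h2
    simp only [List.length_take, List.length_drop] at h1
    simp only [List.getElem_take, List.getElem_drop, List.getElem_map,
      PySem.List.getElem_pyRange_one]
    have hlt : a.toNat + k < ms.length := by omega
    have hgd : PySem.List.pyGetD ms (a + (k : Int)) 0 = ms[(a + (k : Int)).toNat] :=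
      PySem.List.pyGetD_eq_getElem ms 0 (by omega) (by omega)
    rw [hgd, ← List.getD_eq_getElem ms 0 hlt,
      ← List.getD_eq_getElem ms 0 (show (a + (k : Int)).toNat < ms.length by omega)]
    congr 1
    omega

-- A's break-scan 'idx = 0; for i in R: if l[i] != -1: idx = i; break'
theorem aScan_zero (l : List Int) (R : List Nat) (h : ∀ i ∈ R, l.getD i 0 = -1) :
    aScan l R = 0 := by
  induction R with
  | nil => rfl
  | cons i t ih =>
    simp only [aScan]
    rw [if_neg (not_not_intro (h i (by simp)))]
    exact ih (fun w hw => h w (by simp [hw]))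

theorem aScan_range' (l : List Int) :
    ∀ (k a j : Nat), a ≤ j → j < a + k → (∀ i, a ≤ i → i < j → l.getD i 0 = -1) →
      l.getD j 0 ≠ -1 → aScan l (List.range' a k) = j := by
  intro k
  induction k with
  | zero => intro a j h1 h2; omega
  | succ k ih =>
    intro a j h1 h2 hb hh
    rw [List.range'_succ]
    by_cases hja : j = a
    · subst hja
      simp only [aScan]
      rw [if_pos hh]
    · have hma : l.getD a 0 = -1 := hb a le_rfl (by omega)
      simp only [aScan]
      rw [if_neg (not_not_intro hma)]
      exact ih (a + 1) j (by omega) (by omega) (fun i hi1 hi2 => hb i (by omega) hi2) hh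

theorem aScan_rev (l : List Int) :
    ∀ (n p : Nat), p < n → (∀ i, p < i → i < n → l.getD i 0 = -1) →
      l.getD p 0 ≠ -1 → aScan l (List.range n).reverse = p := by
  intro n
  induction n with
  | zero => intro p h1; omega
  | succ n ih =>
    intro p h1 hafter hh
    rw [List.range_succ, List.reverse_append]
    simp only [List.reverse_cons, List.reverse_nil, List.nil_append, List.cons_append,
      List.nil_append]
    by_cases hpn : p = n
    · subst hpn
      simp only [aScan]
      rw [if_pos hh]
    · have hmn : l.getD n 0 = -1 := hafter n (by omega) (by omega)
      simp only [aScan]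
      rw [if_neg (not_not_intro hmn)]
      exact ih p (by omega) (fun i hi1 hi2 => hafter i hi1 (by omega)) hh

-- the two in-place fill loops
theorem aFillF_length (R : List Nat) : ∀ (l : List Int) (mp : Int), (aFillF l mp R).length = l.length := by
  induction R with
  | nil => intro l mp; rfl
  | cons i t ih => intro l mp; simp [aFillF, ih]

theorem aFillB_length (R : List Nat) : ∀ (l : List Int) (mp : Int), (aFillB l mp R).length = l.length := by
  induction R with
  | nil => intro l mp; rfl
  | cons i t ih => intro l mp; simp [aFillB, ih]

theorem aFillF_getD_not_mem (R : List Nat) :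
    ∀ (l : List Int) (mp : Int) (t : Nat), t ∉ R → (aFillF l mp R).getD t 0 = l.getD t 0 := by
  induction R with
  | nil => intro l mp t _; rfl
  | cons i r ih =>
    intro l mp t ht
    simp only [List.mem_cons, not_or] at ht
    rw [aFillF, ih _ _ _ ht.2, getD_set_ne _ _ _ _ (fun h => ht.1 h.symm)]

theorem aFillB_getD_not_mem (R : List Nat) :
    ∀ (l : List Int) (mp : Int) (t : Nat), t ∉ R → (aFillB l mp R).getD t 0 = l.getD t 0 := by
  induction R with
  | nil => intro l mp t _; rfl
  | cons i r ih =>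
    intro l mp t ht
    simp only [List.mem_cons, not_or] at ht
    rw [aFillB, ih _ _ _ ht.2, getD_set_ne _ _ _ _ (fun h => ht.1 h.symm)]

theorem aFillF_head (j : Nat) :
    ∀ (l : List Int) (mp : Int), 1 ≤ j → j ≤ l.length →
      (aFillF l mp (List.range j).reverse).getD 0 0 = mp + j := by
  induction j with
  | zero => intro l mp h1; omega
  | succ j ih =>
    intro l mp _ hlen
    rw [List.range_succ, List.reverse_append]
    simp only [List.reverse_cons, List.reverse_nil, List.nil_append, List.cons_append,
      List.nil_append]
    rw [aFillF]
    by_cases hj : j = 0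
    · subst hj
      simp only [List.range_zero, List.reverse_nil, aFillF]
      rw [getD_set_self _ _ _ (by omega)]
      simp
    · rw [ih _ _ (by omega) (by simp; omega)]
      push_cast
      ring

theorem aFillB_last :
    ∀ (k a : Nat) (l : List Int) (mp : Int), 1 ≤ k → a + k ≤ l.length →
      (aFillB l mp (List.range' a k)).getD (a + k - 1) 0 = mp - k := by
  intro k
  induction k with
  | zero => intro a l mp h1; omega
  | succ k ih =>
    intro a l mp _ hlen
    rw [List.range'_succ, aFillB]
    by_cases hk : k = 0
    · subst hk
      simp only [List.range'_zero, aFillB]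
      rw [Nat.add_sub_cancel, getD_set_self _ _ _ (by omega)]
      simp
    · have := ih (a + 1) (l.set a (mp - 1)) (mp - 1) (by omega) (by simpa using by omega)
      have heq : a + 1 + k - 1 = a + (k + 1) - 1 := by omega
      rw [heq] at this
      rw [this]
      push_cast
      ring

theorem getD_mem (l : List Int) (k : Nat) (h : k < l.length) : l.getD k 0 ∈ l := by
  rw [List.getD_eq_getElem l 0 h]
  exact List.getElem_mem h

theorem getD_reverse (l : List Int) (i : Nat) (h : i < l.length) :
    l.reverse.getD i 0 = l.getD (l.length - 1 - i) 0 := by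
  rw [List.getD_eq_getElem l.reverse 0 (by simpa using h), List.getElem_reverse,
    List.getD_eq_getElem l 0 (by omega)]

theorem bClamp_neg (rl v : Int) (h : v < 0) : bClamp rl v = 0 := if_pos h

-- the four clamp statements read/write only the first and last cells
theorem clamp_pair (rl : Int) (l : List Int) (hne : l ≠ []) (hrl : 1 ≤ rl) :
    [PySem.List.pyGetD (aClamp4 rl (aClamp3 (aClamp2 rl (aClamp1 l)))) 0 0,
     PySem.List.pyGetD (aClamp4 rl (aClamp3 (aClamp2 rl (aClamp1 l)))) (-1) 0]
    = [bClamp rl (l.getD 0 0), bClamp rl (l.getD (l.length - 1) 0)] := by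
  rcases l with _ | ⟨x, t⟩
  · simp at hne
  rcases t with _ | ⟨y, t⟩
  · -- singleton: all four statements hit the same cell
    have s1 : ∀ v : Int, aClamp1 [v] = [if v < 0 then 0 else v] := by
      intro v; rw [aClamp1, pyGetD_zero_eq, List.getD_cons_zero]; split_ifs <;> rfl
    have s2 : ∀ v : Int, aClamp2 rl [v] = [if v > rl then rl - 1 else v] := by
      intro v; rw [aClamp2, pyGetD_zero_eq, List.getD_cons_zero]; split_ifs <;> rfl
    have s3 : ∀ v : Int, aClamp3 [v] = [if v < 0 then 0 else v] := by
      intro v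
      rw [aClamp3, pyGetD_neg_one_eq _ (by simp)]
      simp only [List.length_singleton, Nat.sub_self, List.getD_cons_zero]
      split_ifs <;> rfl
    have s4 : ∀ v : Int, aClamp4 rl [v] = [if v > rl then rl - 1 else v] := by
      intro v
      rw [aClamp4, pyGetD_neg_one_eq _ (by simp)]
      simp only [List.length_singleton, Nat.sub_self, List.getD_cons_zero]
      split_ifs <;> rfl
    rw [s1, s2, s3, s4, pyGetD_zero_eq, pyGetD_neg_one_eq _ (by simp)]
    simp only [bClamp, List.length_singleton, Nat.sub_self, List.getD_cons_zero]
    simp only [List.cons.injEq, and_true]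
    constructor <;> (split_ifs <;> omega)
  · -- length ≥ 2: head and last are independent cells
    set l0 : List Int := x :: y :: t with hl0
    have hlen : 2 ≤ l0.length := by simp [hl0]
    -- stage 1
    set l1 := aClamp1 l0 with h1
    have e1len : l1.length = l0.length := by
      rw [h1, aClamp1]; split_ifs <;> simp
    have e1ne : l1 ≠ [] := by
      intro hc; rw [← List.length_eq_zero_iff] at hc; omega
    have e1h : l1.getD 0 0 = if l0.getD 0 0 < 0 then 0 else l0.getD 0 0 := by
      rw [h1, aClamp1, pyGetD_zero_eq]
      split_ifs <;> [exact getD_set_self _ _ _ (by omega); rfl]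
    have e1l : l1.getD (l0.length - 1) 0 = l0.getD (l0.length - 1) 0 := by
      rw [h1, aClamp1]
      split_ifs <;> [exact getD_set_ne _ _ _ _ (by omega); rfl]
    -- stage 2
    set l2 := aClamp2 rl l1 with h2
    have e2len : l2.length = l0.length := by
      rw [h2, aClamp2]; split_ifs <;> simp [e1len]
    have e2ne : l2 ≠ [] := by
      intro hc; rw [← List.length_eq_zero_iff] at hc; omega
    have e2h : l2.getD 0 0 = if l1.getD 0 0 > rl then rl - 1 else l1.getD 0 0 := by
      rw [h2, aClamp2, pyGetD_zero_eq]
      split_ifs <;> [exact getD_set_self _ _ _ (by omega); rfl]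
    have e2l : l2.getD (l0.length - 1) 0 = l1.getD (l0.length - 1) 0 := by
      rw [h2, aClamp2]
      split_ifs <;> [exact getD_set_ne _ _ _ _ (by omega); rfl]
    -- stage 3
    set l3 := aClamp3 l2 with h3
    have e3len : l3.length = l0.length := by
      rw [h3, aClamp3]; split_ifs <;> simp [e2len]
    have e3ne : l3 ≠ [] := by
      intro hc; rw [← List.length_eq_zero_iff] at hc; omega
    have e3h : l3.getD 0 0 = l2.getD 0 0 := by
      rw [h3, aClamp3]
      split_ifs <;> [exact getD_set_ne _ _ _ _ (by omega); rfl]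
    have e3l : l3.getD (l0.length - 1) 0 =
        if l2.getD (l0.length - 1) 0 < 0 then 0 else l2.getD (l0.length - 1) 0 := by
      rw [h3, aClamp3, pyGetD_neg_one_eq _ e2ne, e2len]
      split_ifs <;> [exact getD_set_self _ _ _ (by omega); rfl]
    -- stage 4
    set l4 := aClamp4 rl l3 with h4
    have e4len : l4.length = l0.length := by
      rw [h4, aClamp4]; split_ifs <;> simp [e3len]
    have e4ne : l4 ≠ [] := by
      intro hc; rw [← List.length_eq_zero_iff] at hc; omega
    have e4h : l4.getD 0 0 = l3.getD 0 0 := by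
      rw [h4, aClamp4]
      split_ifs <;> [exact getD_set_ne _ _ _ _ (by omega); rfl]
    have e4l : l4.getD (l0.length - 1) 0 =
        if l3.getD (l0.length - 1) 0 > rl then rl - 1 else l3.getD (l0.length - 1) 0 := by
      rw [h4, aClamp4, pyGetD_neg_one_eq _ e3ne, e3len]
      split_ifs <;> [exact getD_set_self _ _ _ (by omega); rfl]
    rw [pyGetD_zero_eq, pyGetD_neg_one_eq _ e4ne, e4len]
    rw [e4h, e3h, e2h, e1h, e4l, e3l, e2l, e1l]
    simp only [bClamp, List.cons.injEq, and_true]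
    constructor <;> (split_ifs <;> omega)

-- aFront: length, head value, and preservation of positions ≥ the scan index
theorem aFront_length (l : List Int) : (aFront l).length = l.length := by
  rw [aFront]; split_ifs <;> simp [aFillF_length]

theorem aFront_all (l : List Int) (h : ∀ v ∈ l, v = -1) : aFront l = l := by
  rw [aFront]
  split_ifs with hc
  · have hs : aScan l (List.range l.length) = 0 :=
      aScan_zero _ _ (fun i hi => h _ (getD_mem _ _ (by simpa using hi)))
    rw [hs]
    simp [aFillF]
  · rfl

theorem aFront_spec (l : List Int) (j : Nat) (hj : j < l.length)
    (hb : ∀ i, i < j → l.getD i 0 = -1) (hh : l.getD j 0 ≠ -1) :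
    (aFront l).getD 0 0 = l.getD j 0 + j ∧ ∀ t, j ≤ t → (aFront l).getD t 0 = l.getD t 0 := by
  rw [aFront]
  by_cases hc : PySem.List.pyGetD l 0 0 = -1
  · have hj0 : j ≠ 0 := by
      intro h; subst h; rw [pyGetD_zero_eq] at hc; exact hh hc
    rw [if_pos hc]
    have hscan : aScan l (List.range l.length) = j := by
      rw [List.range_eq_range']
      exact aScan_range' l l.length 0 j (Nat.zero_le j) (by omega) (fun i _ hi => hb i hi) hh
    simp only [hscan]
    constructor
    · exact aFillF_head j l _ (by omega) (by omega)
    · intro t ht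
      exact aFillF_getD_not_mem _ _ _ _ (by simp only [List.mem_reverse, List.mem_range]; omega)
  · rw [if_neg hc]
    have hj0 : j = 0 := by
      by_contra h
      exact hc (by rw [pyGetD_zero_eq]; exact hb 0 (by omega))
    subst hj0
    exact ⟨by simp, fun t _ => rfl⟩

theorem aBack_spec (l : List Int) (p : Nat) (hp : p < l.length)
    (hafter : ∀ i, p < i → i < l.length → l.getD i 0 = -1) (hh : l.getD p 0 ≠ -1) :
    (aBack l).length = l.length ∧ (aBack l).getD 0 0 = l.getD 0 0 ∧
      (aBack l).getD (l.length - 1) 0 = l.getD p 0 - ((l.length - 1 - p : Nat) : Int) := by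
  have hne : l ≠ [] := by intro h; subst h; simp at hp
  rw [aBack]
  by_cases hc : PySem.List.pyGetD l (-1) 0 = -1
  · have hplt : p < l.length - 1 := by
      rcases Nat.lt_or_ge p (l.length - 1) with h | h
      · exact h
      · exfalso
        have hple : p = l.length - 1 := by omega
        rw [pyGetD_neg_one_eq _ hne, ← hple] at hc
        exact hh hc
    rw [if_pos hc]
    have hscan : aScan l (List.range l.length).reverse = p :=
      aScan_rev l l.length p (by omega) hafter hh
    simp only [hscan]
    refine ⟨by simp [aFillB_length], ?_, ?_⟩
    · exact aFillB_getD_not_mem _ _ _ _ (by simp only [List.mem_range'_1]; omega)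
    · have hlast := aFillB_last (l.length - (p + 1)) (p + 1) l (l.getD p 0) (by omega) (by omega)
      have heq : p + 1 + (l.length - (p + 1)) - 1 = l.length - 1 := by omega
      rw [heq] at hlast
      rw [hlast]
      congr 2
      omega
  · rw [if_neg hc]
    have hpl : p = l.length - 1 := by
      by_contra h
      exact hc (by
        rw [pyGetD_neg_one_eq _ hne]
        exact hafter (l.length - 1) (by omega) (by omega))
    refine ⟨rfl, rfl, ?_⟩
    have h0 : l.length - 1 - p = 0 := by omega
    rw [h0, ← hpl]
    simp

theorem aBack_all (l : List Int) (hne : l ≠ []) (h : ∀ v ∈ l, v = -1) :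
    (aBack l).length = l.length ∧ (aBack l).getD 0 0 < 0 ∧
      (aBack l).getD (l.length - 1) 0 < 0 := by
  have hlen : 1 ≤ l.length := by
    rcases l with _ | _
    · simp at hne
    · simp
  have hmp : l.getD 0 0 = -1 := h _ (getD_mem _ _ (by omega))
  have hc : PySem.List.pyGetD l (-1) 0 = -1 := by
    rw [pyGetD_neg_one_eq _ hne]
    exact h _ (getD_mem _ _ (by omega))
  rw [aBack, if_pos hc]
  have hscan : aScan l (List.range l.length).reverse = 0 :=
    aScan_zero _ _ (fun i hi => h _ (getD_mem _ _ (by simpa using hi)))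
  simp only [hscan, Nat.zero_add]
  by_cases h1 : l.length = 1
  · have h0 : l.length - 1 = 0 := by omega
    rw [h0]
    simp only [List.range'_zero, aFillB]
    exact ⟨trivial, by omega, by omega⟩
  · refine ⟨by simp [aFillB_length], ?_, ?_⟩
    · rw [aFillB_getD_not_mem _ _ _ _ (by simp only [List.mem_range'_1]; omega), hmp]
      omega
    · have hlast := aFillB_last (l.length - 1) 1 l (l.getD 0 0) (by omega) (by omega)
      have heq : 1 + (l.length - 1) - 1 = l.length - 1 := by omega
      rw [heq] at hlast
      rw [hlast, hmp]
      have : (1 : Int) ≤ ((l.length - 1 : Nat) : Int) := by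
        have : 2 ≤ l.length := by omega
        omega
      omega

theorem aBack_length (l : List Int) : (aBack l).length = l.length := by
  rw [aBack]; split_ifs <;> simp [aFillB_length]

-- ===== VERDICT (by name: the statement is the Claim_ definition above) =====
theorem get_matched_pos_spec : Claim_equal_get_matched_pos := by
  intro s e ms hdom hpre
  unfold Pre_get_matched_pos at hpre
  simp only [Spec_get_matched_pos, get_matched_pos, get_matched_pos_alt]
  set rl : Int := (ms.length : Int) with hrl
  set sp : Int := if (if s < 0 then 0 else s) > rl then rl - 1 else (if s < 0 then 0 else s) with hsp
  set ep : Int := if e > rl then rl - 1 else e with hep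
  replace hpre : (sp = 0 ∧ ep = 0) ∨ (0 ≤ sp ∧ sp < ep) := hpre
  by_cases hc : sp = 0 ∧ ep = 0
  · rw [if_pos hc, if_pos hc]
  · rw [if_neg hc, if_neg hc]
    obtain ⟨hsp0, hlt⟩ := hpre.resolve_left hc
    have heple : ep ≤ rl := by rw [hep]; split_ifs <;> omega
    have hrl1 : 1 ≤ rl := by omega
    have hbuild : List.foldl (fun acc i => acc ++ [PySem.List.pyGetD ms i 0]) []
        (PySem.List.pyRange sp ep 1) =
        (PySem.List.pyRange sp ep 1).map (fun i => PySem.List.pyGetD ms i 0) := by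
      rw [PySem.List.foldl_append_singleton_eq_map]
      simp
    rw [hbuild]
    set sub := (PySem.List.pyRange sp ep 1).map (fun i => PySem.List.pyGetD ms i 0) with hsubdef
    have hsublen : sub.length = (ep - sp).toNat := by
      rw [hsubdef, List.length_map, PySem.List.length_pyRange_one]
    have hn1 : 1 ≤ sub.length := by omega
    have hsubne : sub ≠ [] := by
      intro h
      rw [h] at hn1
      simp at hn1
    -- B's window is the slice = the list of scanned values; its loops are the aux scans
    have hwin : PySem.List.slice ms (some sp) (some ep) = sub :=
      slice_eq_map_pyRange ms sp ep hsp0 (by omega) heple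
    have hB1 : (if PySem.List.pyGetD sub 0 0 = -1 then bLoopF (PySem.List.enumerate sub 0)
        else PySem.List.pyGetD sub 0 0) = auxF sub 0 := by
      rcases sub with _ | ⟨v, t⟩
      · simp at hn1
      · by_cases hv : v = -1 <;>
          simp [PySem.List.pyGetD_zero_cons, PySem.List.enumerate_cons, auxF, bLoopF, hv,
            bLoopF_enumerate]
    have hB2 : (if PySem.List.pyGetD sub (-1) 0 = -1 then bLoopB (PySem.List.enumerate sub.reverse 0)
        else PySem.List.pyGetD sub (-1) 0) = auxB sub.reverse 0 := by
      have hrd : PySem.List.pyGetD sub (-1) 0 = sub.reverse.getD 0 0 := by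
        rw [pyGetD_neg_one_eq _ hsubne, getD_reverse _ _ (by omega)]
        simp
      rcases hr : sub.reverse with _ | ⟨u, r⟩
      · have hlen0 : sub.reverse.length = 0 := by rw [hr]; rfl
        rw [List.length_reverse] at hlen0
        omega
      · rw [hrd, hr]
        by_cases hu : u = -1 <;>
          simp [PySem.List.enumerate_cons, auxB, bLoopB, hu,
            bLoopB_enumerate]
    rw [hwin, hB1, hB2]
    -- A's clamp chain reads only the first and last cell of aBack (aFront sub)
    have hafne : aBack (aFront sub) ≠ [] := by
      intro h
      have := aBack_length (aFront sub)
      rw [h, aFront_length] at this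
      simp at this
      omega
    rw [clamp_pair rl (aBack (aFront sub)) hafne hrl1]
    rw [aBack_length, aFront_length]
    by_cases hall : ∀ v ∈ sub, v = -1
    · rw [aFront_all sub hall]
      obtain ⟨hbl, hbh, hblast⟩ := aBack_all sub hsubne hall
      rw [auxF_all sub 0 hall,
        auxB_all sub.reverse 0 (fun v hv => hall v (List.mem_reverse.mp hv))]
      rw [bClamp_neg rl _ hbh, bClamp_neg rl _ hblast, bClamp_neg rl (-1) (by omega)]
    · rw [not_forall] at hall
      obtain ⟨v, hv⟩ := hall
      rw [Classical.not_imp] at hv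
      obtain ⟨hv, hvne⟩ := hv
      obtain ⟨k, hk, hkv⟩ := List.mem_iff_getElem.mp hv
      have hex : ∃ i, i < sub.length ∧ sub.getD i 0 ≠ -1 :=
        ⟨k, hk, by rw [List.getD_eq_getElem _ 0 hk, hkv]; exact hvne⟩
      -- j: the first non-(-1) index
      have hjlt : Nat.find hex < sub.length := (Nat.find_spec hex).1
      have hjhit : sub.getD (Nat.find hex) 0 ≠ -1 := (Nat.find_spec hex).2
      have hjmin : ∀ i, i < Nat.find hex → sub.getD i 0 = -1 := by
        intro i hi
        by_contra hcon
        exact Nat.find_min hex hi ⟨by omega, hcon⟩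
      set j := Nat.find hex with hjdef
      -- q: the first non-(-1) index of the reversed list; p := length - 1 - q is the last one
      have hexr : ∃ i, i < sub.reverse.length ∧ sub.reverse.getD i 0 ≠ -1 := by
        refine ⟨sub.length - 1 - j, by rw [List.length_reverse]; omega, ?_⟩
        rw [getD_reverse _ _ (by omega),
          show sub.length - 1 - (sub.length - 1 - j) = j by omega]
        exact hjhit
      have hqlt : Nat.find hexr < sub.length :=
        lt_of_lt_of_eq (Nat.find_spec hexr).1 List.length_reverse
      have hphit : sub.getD (sub.length - 1 - Nat.find hexr) 0 ≠ -1 := by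
        have := (Nat.find_spec hexr).2
        rwa [getD_reverse _ _ hqlt] at this
      have hafter : ∀ i, sub.length - 1 - Nat.find hexr < i → i < sub.length →
          sub.getD i 0 = -1 := by
        intro i h1 h2
        by_contra hcon
        refine Nat.find_min hexr (show sub.length - 1 - i < Nat.find hexr by omega)
          ⟨by rw [List.length_reverse]; omega, ?_⟩
        rw [getD_reverse _ _ (by omega),
          show sub.length - 1 - (sub.length - 1 - i) = i by omega]
        exact hcon
      set q := Nat.find hexr with hqdef
      set p := sub.length - 1 - q with hpdef
      have hjp : j ≤ p := Nat.find_min' hex ⟨by omega, hphit⟩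
      obtain ⟨hfh, hfrest⟩ := aFront_spec sub j hjlt hjmin hjhit
      have hl1len : (aFront sub).length = sub.length := aFront_length sub
      have hl1after : ∀ i, p < i → i < (aFront sub).length → (aFront sub).getD i 0 = -1 := by
        intro i h1 h2
        rw [hfrest i (by omega)]
        exact hafter i h1 (by omega)
      obtain ⟨hblen, hbh, hblast⟩ :=
        aBack_spec (aFront sub) p (by omega) hl1after (by rw [hfrest p hjp]; exact hphit)
      -- values of B's scans
      have haF : auxF sub 0 = sub.getD j 0 + (j : Int) := by
        rw [auxF_first sub j 0 hjlt hjmin hjhit]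
        ring_nf
      have haB : auxB sub.reverse 0 = sub.getD p 0 - ((sub.length - 1 - p : Nat) : Int) := by
        rw [auxB_first sub.reverse q 0 (by rw [List.length_reverse]; exact hqlt)
          (fun i hi => by
            by_contra hcon
            exact Nat.find_min hexr hi ⟨by rw [List.length_reverse]; omega, hcon⟩)
          (Nat.find_spec hexr).2]
        rw [getD_reverse _ _ hqlt,
          show sub.length - 1 - p = q by omega, ← hpdef]
        ring
      rw [haF, haB, hbh, hfh]
      rw [hl1len] at hblast
      rw [hblast, hfrest p hjp]
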